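-- pv_equiv track=rewrite | github.com/Rayyan9477/Solace-AI | services/diagnosis_service/src/domain/value_objects.py | _parse_duration_days
-- ===== SOURCE A (Python) =====
-- def _parse_duration_days(duration: str) -> int | None:
--     """Parse duration string to approximate days."""
--     duration_lower = duration.lower()
--     if "week" in duration_lower:
--         weeks = 1
--         for word in duration_lower.split():
--             if word.isdigit():
--                 weeks = int(word)
--                 break
--         return weeks * 7
--     if "month" in duration_lower:
--         months = 1
--         for word in duration_lower.split():
--             if word.isdigit():
--                 months = int(word)
--                 break
--         return months * 30
--     if "year" in duration_lower:
--         years = 1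
--         for word in duration_lower.split():
--             if word.isdigit():
--                 years = int(word)
--                 break
--         return years * 365
--     if "day" in duration_lower:
--         for word in duration_lower.split():
--             if word.isdigit():
--                 return int(word)
--         return 1
--     return None
-- ===== SOURCE B (Python) =====
-- _KEYS = ("week", "month", "year", "day")
-- _FACTORS = (7, 30, 365, 1)
--
--
-- def _key_index(word: str) -> int:
--     """Priority index of the highest-priority keyword occurring in word (4 = none)."""
--     for i, key in enumerate(_KEYS):
--         if key in word:
--             return i
--     return 4
--
--
-- def _parse_duration_days(duration: str) -> int | None:
--     """Parse duration string to approximate days."""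
--     count = None
--     best = 4
--     for word in duration.lower().split():
--         if count is None and word.isdigit():
--             count = int(word)
--         best = min(best, _key_index(word))
--     if best == 4:
--         return None
--     return (1 if count is None else count) * _FACTORS[best]
-- ===== Notes on version B (the rewrite author's own statement) =====
-- stated objective: alternative
-- what changed: A tests each keyword against the whole string in four sequential branches, each repeating its own digit-scan loop over the split words; B makes one fused pass over the split words, maintaining two accumulators (first numeric token, minimum keyword-priority index per word) and finishes with one table lookup; correctness rests on keywords containing no whitespace, so whole-string containment equals containment in some word.
import Mathlib
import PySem

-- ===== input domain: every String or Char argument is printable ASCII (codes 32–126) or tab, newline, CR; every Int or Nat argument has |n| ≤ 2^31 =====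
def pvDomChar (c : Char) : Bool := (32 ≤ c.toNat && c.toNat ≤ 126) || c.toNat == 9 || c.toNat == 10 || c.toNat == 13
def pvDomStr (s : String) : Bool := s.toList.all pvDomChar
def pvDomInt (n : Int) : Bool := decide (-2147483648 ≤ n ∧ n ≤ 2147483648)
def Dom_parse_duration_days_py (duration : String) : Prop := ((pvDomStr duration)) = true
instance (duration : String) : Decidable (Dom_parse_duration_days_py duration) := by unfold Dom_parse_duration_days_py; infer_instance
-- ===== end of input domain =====

-- B replaces A's four whole-string keyword branches (each with its own digit-scan
-- loop over the split words) by ONE fused pass over the words keeping two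
-- accumulators (first numeric token, minimum keyword-priority index) plus a final
-- table lookup; objective: alternative decomposition, same cost.


-- ===== PORT A =====
-- the digit-extraction loop A repeats verbatim inside its week/month/year branches
-- ('x = 1; for word in split(): if word.isdigit(): x = int(word); break');
-- int(word) cannot raise when word.isdigit(), so '.getD 1' is an unreachable default
def aScan : List String → Int
  | [] => 1
  | w :: rest =>
    if PySem.Str.strIsdigit w then (PySem.Int.ofStr? w).getD 1 else aScan rest

-- A's 'day' loop, which RETURNS int(word) from inside the loop and 1 after it
def aDayScan : List String → Int
  | [] => 1
  | w :: rest =>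
    if PySem.Str.strIsdigit w then (PySem.Int.ofStr? w).getD 1 else aDayScan rest

def parse_duration_days_py (duration : String) : Option Int :=
  let dl := PySem.Str.lower duration
  if PySem.Str.isIn "week" dl then some (aScan (PySem.Str.split₀ dl) * 7)
  else if PySem.Str.isIn "month" dl then some (aScan (PySem.Str.split₀ dl) * 30)
  else if PySem.Str.isIn "year" dl then some (aScan (PySem.Str.split₀ dl) * 365)
  else if PySem.Str.isIn "day" dl then some (aDayScan (PySem.Str.split₀ dl))
  else none

-- ===== PORT B =====
-- module-level tables _KEYS and _FACTORS of Source B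
def pvKeys : List String := ["week", "month", "year", "day"]
def pvFactors : List Int := [7, 30, 365, 1]

-- Source B's _key_index: 'for i, key in enumerate(_KEYS): if key in word: return i; return 4'
def pvKeyIndexAux : Nat → List String → String → Nat
  | _, [], _ => 4
  | i, k :: rest, w => if PySem.Str.isIn k w then i else pvKeyIndexAux (i + 1) rest w

-- one iteration of Source B's single loop over the split words:
-- 'if count is None and word.isdigit(): count = int(word)' and 'best = min(best, _key_index(word))'
def pvStep (st : Option Int × Nat) (w : String) : Option Int × Nat :=
  ((if st.1 == none && PySem.Str.strIsdigit w then some ((PySem.Int.ofStr? w).getD 1) else st.1),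
   min st.2 (pvKeyIndexAux 0 pvKeys w))

def parse_duration_days_py_alt (duration : String) : Option Int :=
  let st := (PySem.Str.split₀ (PySem.Str.lower duration)).foldl pvStep ((none : Option Int), 4)
  if st.2 == 4 then none
  -- '(1 if count is None else count) * _FACTORS[best]'; best < 4 here, so the index is in range
  else some (st.1.getD 1 * pvFactors.getD st.2 0)

-- ===== PRECONDITION & SPEC =====
def Spec_parse_duration_days_py (duration : String) (out : Option Int) : Prop := out = parse_duration_days_py_alt duration
instance (duration : String) (out : Option Int) : Decidable (Spec_parse_duration_days_py duration out) := by unfold Spec_parse_duration_days_py; infer_instance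

-- ===== CLAIM =====
def Claim_equal_parse_duration_days_py : Prop := ∀ (duration : String), Dom_parse_duration_days_py duration → Spec_parse_duration_days_py duration (parse_duration_days_py duration)

-- ===== LEMMAS AND PROOFS =====

-- accumulator-free form of PySem.Chars.split₀.go
def pvGoS : List Char → List Char → List (List Char)
  | [], cur => if cur.isEmpty then [] else [cur.reverse]
  | c :: rest, cur =>
    if PySem.Chars.isspace c then
      (if cur.isEmpty then pvGoS rest [] else cur.reverse :: pvGoS rest [])
    else pvGoS rest (c :: cur)

theorem pvGo_eq (s : List Char) : ∀ (cur : List Char) (acc : List (List Char)),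
    PySem.Chars.split₀.go s cur acc = acc.reverse ++ pvGoS s cur := by
  induction s with
  | nil => intro cur acc; by_cases h : cur.isEmpty <;> simp [PySem.Chars.split₀.go, pvGoS, h]
  | cons c rest ih =>
    intro cur acc
    by_cases hs : PySem.Chars.isspace c
    · by_cases h : cur.isEmpty <;>
        simp [PySem.Chars.split₀.go, pvGoS, hs, h, ih]
    · simp [PySem.Chars.split₀.go, pvGoS, hs, ih]

theorem pvSplit₀_eq (s : List Char) : PySem.Chars.split₀ s = pvGoS s [] := by
  simpa using pvGo_eq s [] []

-- every word produced is an infix of the scanned text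
theorem pvGoS_infix (s : List Char) : ∀ (cur w : List Char),
    w ∈ pvGoS s cur → w <:+: (cur.reverse ++ s) := by
  induction s with
  | nil =>
    intro cur w hw
    by_cases h : cur.isEmpty <;> simp [pvGoS, h] at hw
    subst hw; simp
  | cons c rest ih =>
    intro cur w hw
    by_cases hs : PySem.Chars.isspace c
    · by_cases h : cur.isEmpty
      · have hc0 : cur = [] := List.isEmpty_iff.mp h
        subst hc0
        simp only [List.reverse_nil, List.nil_append]
        have := ih [] w (by simpa [pvGoS, hs] using hw)
        simp only [List.reverse_nil, List.nil_append] at this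
        exact this.trans (List.suffix_cons c rest).isInfix
      · simp [pvGoS, hs, h] at hw
        rcases hw with hw | hw
        · subst hw; exact ⟨[], c :: rest, by simp⟩
        · have := ih [] w hw
          simp at this
          refine this.trans ⟨cur.reverse ++ [c], [], by simp⟩
    · have := ih (c :: cur) w (by simpa [pvGoS, hs] using hw)
      simpa using this

-- a prefix of a ++ c :: b avoiding c is a prefix of a
theorem pvPrefixSplit {α : Type} (k : List α) (c : α) :
    ∀ (a b : List α), c ∉ k → k <+: a ++ c :: b → k <+: a := by
  induction k with
  | nil => intro a b _ _; exact List.nil_prefix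
  | cons k0 k' ih =>
    intro a b hc hk
    cases a with
    | nil =>
      rw [List.nil_append, List.cons_prefix_cons] at hk
      exact absurd (hk.1 ▸ List.mem_cons_self) hc
    | cons a0 a' =>
      rw [List.cons_append, List.cons_prefix_cons] at hk
      exact List.cons_prefix_cons.mpr ⟨hk.1, ih a' b (fun hm => hc (List.mem_cons_of_mem _ hm)) hk.2⟩

-- an occurrence of a list avoiding the separator c lies wholly left or right of it
theorem pvInfixSplit {α : Type} (k a b : List α) (c : α) (hc : c ∉ k)
    (h : k <:+: a ++ c :: b) : k <:+: a ∨ k <:+: b := by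
  induction a with
  | nil =>
    simp only [List.nil_append] at h
    rcases List.infix_cons_iff.mp h with hp | hb
    · left
      exact (pvPrefixSplit k c [] b hc (by simpa using hp)).isInfix
    · right; exact hb
  | cons a0 a' ih =>
    rcases List.infix_cons_iff.mp (by simpa using h) with hp | hb
    · left
      exact (pvPrefixSplit k c (a0 :: a') b hc (by simpa using hp)).isInfix
    · rcases ih hb with h1 | h2
      · left; exact h1.trans (List.suffix_cons a0 a').isInfix
      · right; exact h2

-- a whitespace-free nonempty infix of the text is an infix of one of the words
theorem pvGoS_complete (s : List Char) : ∀ (cur k : List Char), k ≠ [] →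
    (∀ c ∈ k, PySem.Chars.isspace c = false) →
    k <:+: (cur.reverse ++ s) → ∃ w ∈ pvGoS s cur, k <:+: w := by
  induction s with
  | nil =>
    intro cur k hne hns hk
    simp at hk
    have hcur : cur.isEmpty = false := by
      cases cur with
      | nil => simp at hk; exact absurd hk hne
      | cons _ _ => rfl
    exact ⟨cur.reverse, by simp [pvGoS, hcur], hk⟩
  | cons c rest ih =>
    intro cur k hne hns hk
    by_cases hs : PySem.Chars.isspace c
    · have hck : c ∉ k := fun hm => by simpa [hs] using hns c hm
      rcases pvInfixSplit k cur.reverse rest c hck hk with hL | hR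
      · have hcur : cur.isEmpty = false := by
          cases cur with
          | nil =>
            exfalso; simp at hL
            exact hne hL
          | cons _ _ => rfl
        exact ⟨cur.reverse, by simp [pvGoS, hs, hcur], hL⟩
      · obtain ⟨w, hw, hkw⟩ := ih [] k hne hns (by simpa using hR)
        refine ⟨w, ?_, hkw⟩
        by_cases h : cur.isEmpty <;> simp [pvGoS, hs, h, hw]
    · have := ih (c :: cur) k hne hns (by simpa using hk)
      simpa [pvGoS, hs] using this

-- keyword containment in the whole string equals containment in some split word
theorem pvIsIn_split₀ (k s : List Char) (hne : k ≠ [])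
    (hns : ∀ c ∈ k, PySem.Chars.isspace c = false) :
    PySem.Chars.isIn k s = true ↔ ∃ w ∈ PySem.Chars.split₀ s, PySem.Chars.isIn k w = true := by
  rw [PySem.Chars.isIn_iff_infix, pvSplit₀_eq]
  constructor
  · intro h
    obtain ⟨w, hw, hkw⟩ := pvGoS_complete s [] k hne hns (by simpa using h)
    exact ⟨w, hw, (PySem.Chars.isIn_iff_infix k w).mpr hkw⟩
  · rintro ⟨w, hw, hkw⟩
    have h1 := pvGoS_infix s [] w hw
    simp at h1
    exact ((PySem.Chars.isIn_iff_infix k w).mp hkw).trans h1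

-- String-level version of the containment/split equivalence, for one keyword
theorem pvKeyIn (k dl : String) (hne : k.toList ≠ [])
    (hns : ∀ c ∈ k.toList, PySem.Chars.isspace c = false) :
    PySem.Str.isIn k dl = true ↔ ∃ w ∈ PySem.Str.split₀ dl, PySem.Str.isIn k w = true := by
  rw [PySem.Str.isIn, pvIsIn_split₀ k.toList dl.toList hne hns, PySem.Str.split₀]
  constructor
  · rintro ⟨wc, hwc, hin⟩
    exact ⟨String.ofList wc, List.mem_map_of_mem hwc, by simpa [PySem.Str.isIn] using hin⟩
  · rintro ⟨w, hw, hin⟩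
    obtain ⟨wc, hwc, rfl⟩ := List.mem_map.mp hw
    exact ⟨wc, hwc, by simpa [PySem.Str.isIn] using hin⟩

-- the nested-if normal form of Source B's _key_index on the literal key table
theorem pvKeyIndexAux_eq (w : String) : pvKeyIndexAux 0 pvKeys w =
    if PySem.Str.isIn "week" w then 0 else if PySem.Str.isIn "month" w then 1
    else if PySem.Str.isIn "year" w then 2 else if PySem.Str.isIn "day" w then 3 else 4 := by
  simp only [pvKeyIndexAux, pvKeys]

theorem pvFki_le_zero (w : String) : pvKeyIndexAux 0 pvKeys w ≤ 0 ↔ PySem.Str.isIn "week" w = true := by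
  rw [pvKeyIndexAux_eq]; split_ifs <;> simp_all

theorem pvFki_le_one (w : String) : pvKeyIndexAux 0 pvKeys w ≤ 1 ↔
    (PySem.Str.isIn "week" w = true ∨ PySem.Str.isIn "month" w = true) := by
  rw [pvKeyIndexAux_eq]; split_ifs <;> simp_all

theorem pvFki_le_two (w : String) : pvKeyIndexAux 0 pvKeys w ≤ 2 ↔
    (PySem.Str.isIn "week" w = true ∨ PySem.Str.isIn "month" w = true ∨
     PySem.Str.isIn "year" w = true) := by
  rw [pvKeyIndexAux_eq]; split_ifs <;> simp_all

theorem pvFki_le_three (w : String) : pvKeyIndexAux 0 pvKeys w ≤ 3 ↔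
    (PySem.Str.isIn "week" w = true ∨ PySem.Str.isIn "month" w = true ∨
     PySem.Str.isIn "year" w = true ∨ PySem.Str.isIn "day" w = true) := by
  rw [pvKeyIndexAux_eq]; split_ifs <;> simp_all

-- the count accumulator, once set, never changes
theorem pvFold_fst_some (ws : List String) : ∀ (v : Int) (b : Nat),
    (ws.foldl pvStep (some v, b)).1 = some v := by
  induction ws with
  | nil => intro v b; rfl
  | cons w ws ih =>
    intro v b
    have hb : ((some v : Option Int) == none) = false := rfl
    simp only [List.foldl_cons, pvStep, hb, Bool.false_and, if_neg Bool.false_ne_true]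
    exact ih v _

-- the count accumulator computes exactly A's digit-scan (with default 1)
theorem pvFold_fst_none (ws : List String) : ∀ (b : Nat),
    ((ws.foldl pvStep (none, b)).1).getD 1 = aScan ws := by
  induction ws with
  | nil => intro b; rfl
  | cons w ws ih =>
    intro b
    by_cases hd : PySem.Str.strIsdigit w
    · have hd' : PySem.Chars.strIsdigit w.toList = true := by simpa using hd
      simp [pvStep, hd', aScan, pvFold_fst_some]
    · simp only [List.foldl_cons, pvStep, aScan, hd, Bool.and_false, if_neg Bool.false_ne_true]
      exact ih _

-- the best-index accumulator is a running minimum of per-word key indices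
theorem pvFold_snd (ws : List String) : ∀ (c : Option Int) (b : Nat),
    (ws.foldl pvStep (c, b)).2 = ws.foldl (fun b w => min b (pvKeyIndexAux 0 pvKeys w)) b := by
  induction ws with
  | nil => intro c b; rfl
  | cons w ws ih =>
    intro c b
    simp only [List.foldl_cons, pvStep]
    exact ih _ _

theorem pvFoldMin_le_iff (ws : List String) : ∀ (b j : Nat),
    ws.foldl (fun b w => min b (pvKeyIndexAux 0 pvKeys w)) b ≤ j ↔
      b ≤ j ∨ ∃ w ∈ ws, pvKeyIndexAux 0 pvKeys w ≤ j := by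
  induction ws with
  | nil => intro b j; simp
  | cons w ws ih =>
    intro b j
    rw [List.foldl_cons, ih]
    constructor
    · rintro (h | ⟨w', hw', h⟩)
      · rcases min_le_iff.mp h with h | h
        · exact Or.inl h
        · exact Or.inr ⟨w, List.mem_cons_self, h⟩
      · exact Or.inr ⟨w', List.mem_cons_of_mem _ hw', h⟩
    · rintro (h | ⟨w', hw', h⟩)
      · exact Or.inl (le_trans (min_le_left _ _) h)
      · rcases List.mem_cons.mp hw' with rfl | hw'
        · exact Or.inl (le_trans (min_le_right _ _) h)
        · exact Or.inr ⟨w', hw', h⟩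

theorem aDayScan_eq_aScan (ws : List String) : aDayScan ws = aScan ws := by
  induction ws with
  | nil => rfl
  | cons w ws ih => simp [aDayScan, aScan, ih]

-- ===== VERDICT =====
theorem parse_duration_days_py_spec : Claim_equal_parse_duration_days_py := by
  intro d _
  unfold Spec_parse_duration_days_py parse_duration_days_py parse_duration_days_py_alt
  have hW := pvKeyIn "week" (PySem.Str.lower d) (by simp) (by simp; decide)
  have hMo := pvKeyIn "month" (PySem.Str.lower d) (by simp) (by simp; decide)
  have hY := pvKeyIn "year" (PySem.Str.lower d) (by simp) (by simp; decide)
  have hD := pvKeyIn "day" (PySem.Str.lower d) (by simp) (by simp; decide)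
  set dl := PySem.Str.lower d with hdl
  set ws := PySem.Str.split₀ dl with hws
  set M := ws.foldl (fun b w => min b (pvKeyIndexAux 0 pvKeys w)) 4 with hM
  have hsnd : ((ws.foldl pvStep ((none : Option Int), 4)).2) = M := pvFold_snd ws none 4
  have hfst : ((ws.foldl pvStep ((none : Option Int), 4)).1).getD 1 = aScan ws :=
    pvFold_fst_none ws 4
  have hMle : ∀ j, M ≤ j ↔ 4 ≤ j ∨ ∃ w ∈ ws, pvKeyIndexAux 0 pvKeys w ≤ j :=
    fun j => pvFoldMin_le_iff ws 4 j
  by_cases h1 : PySem.Str.isIn "week" dl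
  · have hM0 : M = 0 := by
      have hex : ∃ w ∈ ws, pvKeyIndexAux 0 pvKeys w ≤ 0 := by
        obtain ⟨w, hw, hin⟩ := hW.mp h1
        exact ⟨w, hw, (pvFki_le_zero w).mpr hin⟩
      have := (hMle 0).mpr (Or.inr hex)
      omega
    have h1' : PySem.Chars.isIn ['w','e','e','k'] dl.toList = true := by simpa using h1
    simp [h1', hsnd, hfst, hM0, pvFactors, ← hws]
  · by_cases h2 : PySem.Str.isIn "month" dl
    · have hM1 : M = 1 := by
        have hex : ∃ w ∈ ws, pvKeyIndexAux 0 pvKeys w ≤ 1 := by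
          obtain ⟨w, hw, hin⟩ := hMo.mp h2
          exact ⟨w, hw, (pvFki_le_one w).mpr (Or.inr hin)⟩
        have hle := (hMle 1).mpr (Or.inr hex)
        have hnot : ¬ M ≤ 0 := by
          intro hle0
          rcases (hMle 0).mp hle0 with h | ⟨w, hw, hfk⟩
          · omega
          · exact h1 (hW.mpr ⟨w, hw, (pvFki_le_zero w).mp hfk⟩)
        omega
      have h1' : ¬ (PySem.Chars.isIn ['w','e','e','k'] dl.toList = true) := by simpa using h1
      have h2' : PySem.Chars.isIn ['m','o','n','t','h'] dl.toList = true := by simpa using h2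
      simp [h1', h2', hsnd, hfst, hM1, pvFactors, ← hws]
    · by_cases h3 : PySem.Str.isIn "year" dl
      · have hM2 : M = 2 := by
          have hex : ∃ w ∈ ws, pvKeyIndexAux 0 pvKeys w ≤ 2 := by
            obtain ⟨w, hw, hin⟩ := hY.mp h3
            exact ⟨w, hw, (pvFki_le_two w).mpr (Or.inr (Or.inr hin))⟩
          have hle := (hMle 2).mpr (Or.inr hex)
          have hnot : ¬ M ≤ 1 := by
            intro hle1
            rcases (hMle 1).mp hle1 with h | ⟨w, hw, hfk⟩
            · omega
            · rcases (pvFki_le_one w).mp hfk with hin | hin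
              · exact h1 (hW.mpr ⟨w, hw, hin⟩)
              · exact h2 (hMo.mpr ⟨w, hw, hin⟩)
          omega
        have h1' : ¬ (PySem.Chars.isIn ['w','e','e','k'] dl.toList = true) := by simpa using h1
        have h2' : ¬ (PySem.Chars.isIn ['m','o','n','t','h'] dl.toList = true) := by simpa using h2
        have h3' : PySem.Chars.isIn ['y','e','a','r'] dl.toList = true := by simpa using h3
        simp [h1', h2', h3', hsnd, hfst, hM2, pvFactors, ← hws]
      · by_cases h4 : PySem.Str.isIn "day" dl
        · have hM3 : M = 3 := by
            have hex : ∃ w ∈ ws, pvKeyIndexAux 0 pvKeys w ≤ 3 := by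
              obtain ⟨w, hw, hin⟩ := hD.mp h4
              exact ⟨w, hw, (pvFki_le_three w).mpr (Or.inr (Or.inr (Or.inr hin)))⟩
            have hle := (hMle 3).mpr (Or.inr hex)
            have hnot : ¬ M ≤ 2 := by
              intro hle2
              rcases (hMle 2).mp hle2 with h | ⟨w, hw, hfk⟩
              · omega
              · rcases (pvFki_le_two w).mp hfk with hin | hin | hin
                · exact h1 (hW.mpr ⟨w, hw, hin⟩)
                · exact h2 (hMo.mpr ⟨w, hw, hin⟩)
                · exact h3 (hY.mpr ⟨w, hw, hin⟩)
            omega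
          have h1' : ¬ (PySem.Chars.isIn ['w','e','e','k'] dl.toList = true) := by simpa using h1
          have h2' : ¬ (PySem.Chars.isIn ['m','o','n','t','h'] dl.toList = true) := by simpa using h2
          have h3' : ¬ (PySem.Chars.isIn ['y','e','a','r'] dl.toList = true) := by simpa using h3
          have h4' : PySem.Chars.isIn ['d','a','y'] dl.toList = true := by simpa using h4
          simp [h1', h2', h3', h4', hsnd, hfst, hM3, pvFactors, aDayScan_eq_aScan, ← hws]
        · have hM4 : M = 4 := by
            have hle := (hMle 4).mpr (Or.inl (le_refl 4))
            have hnot : ¬ M ≤ 3 := by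
              intro hle3
              rcases (hMle 3).mp hle3 with h | ⟨w, hw, hfk⟩
              · omega
              · rcases (pvFki_le_three w).mp hfk with hin | hin | hin | hin
                · exact h1 (hW.mpr ⟨w, hw, hin⟩)
                · exact h2 (hMo.mpr ⟨w, hw, hin⟩)
                · exact h3 (hY.mpr ⟨w, hw, hin⟩)
                · exact h4 (hD.mpr ⟨w, hw, hin⟩)
            omega
          have h1' : ¬ (PySem.Chars.isIn ['w','e','e','k'] dl.toList = true) := by simpa using h1
          have h2' : ¬ (PySem.Chars.isIn ['m','o','n','t','h'] dl.toList = true) := by simpa using h2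
          have h3' : ¬ (PySem.Chars.isIn ['y','e','a','r'] dl.toList = true) := by simpa using h3
          have h4' : ¬ (PySem.Chars.isIn ['d','a','y'] dl.toList = true) := by simpa using h4
          simp [h1', h2', h3', h4', hsnd, hM4]
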